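-- pv_equiv track=rewrite | github.com/Neural-Symbolic-Image-Labeling/Rapid | foil/model_label/foil.py | get_new_total_list1
-- ===== SOURCE A (Python) =====
-- import math,re,copy,json,time
--
-- def get_new_total_list1(result_list,total_list):        #use for outer loop
--     del_number_hd=[]
--     new_total=copy.deepcopy(total_list)           #use deepcopy for not changing the total_list
--     for clauses_list in result_list:
--         for image_number,image in enumerate(total_list):
--             del_result=True
--             for clause in clauses_list:
--                 if (clause not in image):        #remember the position of image that does not has special clause
--                     del_result=False
--                     break
--             if del_result==True:
--                 del_number_hd.append(image_number)
--     del_number=list(set(del_number_hd))         #del_number has no duplicate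
--     del_number.sort()
--     for i in range(len(del_number)):
--         del new_total[del_number[len(del_number)-1-i]]               #the position is in positive sequence, first delete the back one
--     return new_total   #two dimentional list, get the result which not has the positive that satisfy right side
-- ===== SOURCE B (Python) =====
-- import copy
--
-- def get_new_total_list1(result_list, total_list):
--     # Single forward filter: keep an image iff it satisfies no clause-group.
--     return [copy.deepcopy(image) for image in total_list
--             if not any(all(clause in image for clause in clauses_list)
--                        for clauses_list in result_list)]
-- ===== Notes on version B (the rewrite author's own statement) =====
-- stated objective: simpler
-- what changed: Replaced the mark-indices/dedup/sort/reverse-delete pipeline with one forward filter that keeps an image iff it satisfies no clause-group.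
import Mathlib
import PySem

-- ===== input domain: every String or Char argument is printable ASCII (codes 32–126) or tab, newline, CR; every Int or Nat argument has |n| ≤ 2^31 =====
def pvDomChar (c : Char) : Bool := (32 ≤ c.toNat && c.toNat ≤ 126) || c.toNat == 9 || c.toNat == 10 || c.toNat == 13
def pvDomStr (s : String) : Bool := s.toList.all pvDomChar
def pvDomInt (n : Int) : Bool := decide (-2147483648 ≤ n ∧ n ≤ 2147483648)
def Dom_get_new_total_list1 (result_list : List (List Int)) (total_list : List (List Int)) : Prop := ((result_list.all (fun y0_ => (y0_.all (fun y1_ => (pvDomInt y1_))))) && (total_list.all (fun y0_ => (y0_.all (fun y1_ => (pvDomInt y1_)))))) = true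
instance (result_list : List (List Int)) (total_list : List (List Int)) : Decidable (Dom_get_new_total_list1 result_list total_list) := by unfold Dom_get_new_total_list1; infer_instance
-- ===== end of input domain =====

-- B replaces A's mark-indices/dedup/sort/reverse-delete pipeline with a single forward
-- filter keeping each image iff it satisfies no clause-group (objective: simpler).
-- deepcopy copies values, so in Lean (immutable lists) it is the identity.

-- ===== PORT A =====
-- inner 'for clause in clauses_list: if clause not in image: del_result=False; break'
def pvCheck : List Int → List Int → Bool
  | [], _ => true
  | clause :: rest, image =>
      if !(image.contains clause) then false else pvCheck rest image

-- 'del new_total[idx]' where idx came from an indexing that cannot fail here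
def pvDelStep (nt : List (List Int)) (o : Option Int) : List (List Int) :=
  match o with
  | some d => nt.eraseIdx d.toNat
  | none => nt   -- unreachable: the index is always in range

def get_new_total_list1 (result_list : List (List Int)) (total_list : List (List Int)) : List (List Int) :=
  let del_number_hd : List Int :=
    result_list.foldl (fun acc clauses_list =>
      (PySem.List.enumerate total_list).foldl (fun acc2 p =>
        if pvCheck clauses_list p.2 then acc2 ++ [p.1] else acc2) acc) []
  let new_total := total_list      -- copy.deepcopy: identity on immutable values
  -- list(set(...)) then .sort(): the sort makes Python's set iteration order irrelevant
  let del_number := PySem.List.sorted (PySem.Set.ofList del_number_hd) (fun x => x) false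
  (PySem.List.pyRange 0 (del_number.length : Int) 1).foldl (fun nt i =>
    pvDelStep nt (PySem.List.pyGet? del_number ((del_number.length : Int) - 1 - i))) new_total

-- ===== PORT B =====
def get_new_total_list1_alt (result_list : List (List Int)) (total_list : List (List Int)) : List (List Int) :=
  total_list.filter (fun image =>
    !(result_list.any (fun clauses_list => clauses_list.all (fun clause => image.contains clause))))

-- ===== PRECONDITION & SPEC =====
def Spec_get_new_total_list1 (result_list : List (List Int)) (total_list : List (List Int)) (out : List (List Int)) : Prop := out = get_new_total_list1_alt result_list total_list
instance (result_list : List (List Int)) (total_list : List (List Int)) (out : List (List Int)) : Decidable (Spec_get_new_total_list1 result_list total_list out) := by unfold Spec_get_new_total_list1; infer_instance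

-- ===== CLAIM (what is proved, stated in full; the proofs are below) =====
def Claim_equal_get_new_total_list1 : Prop := ∀ (result_list : List (List Int)) (total_list : List (List Int)), Dom_get_new_total_list1 result_list total_list → Spec_get_new_total_list1 result_list total_list (get_new_total_list1 result_list total_list)

-- ===== LEMMAS AND PROOFS =====

-- the per-image test, shared shape of both sides
def pvSat (result_list : List (List Int)) (image : List Int) : Bool :=
  result_list.any (fun clauses_list => clauses_list.all (fun clause => image.contains clause))

theorem pvCheck_eq_all (cl image : List Int) :
    pvCheck cl image = cl.all (fun c => image.contains c) := by
  induction cl with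
  | nil => rfl
  | cons c rest ih =>
      simp only [pvCheck, List.all_cons]
      cases h : image.contains c <;> simp [h, ih]

-- keep the elements whose (0-based, starting at i) index is NOT in ds
def keepIdx {α : Type} (ds : List Int) : Nat → List α → List α
  | _, [] => []
  | i, x :: xs =>
      if (i : Int) ∈ ds then keepIdx ds (i+1) xs else x :: keepIdx ds (i+1) xs

theorem keepIdx_nil {α : Type} (i : Nat) (xs : List α) : keepIdx [] i xs = xs := by
  induction xs generalizing i with
  | nil => rfl
  | cons x xs ih => simp [keepIdx, ih]

theorem keepIdx_irrel {α : Type} (d : Int) (ds : List Int) (xs : List α) (i : Nat)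
    (h : d < (i : Int)) : keepIdx (d :: ds) i xs = keepIdx ds i xs := by
  induction xs generalizing i with
  | nil => rfl
  | cons x xs ih =>
      have hne : ¬ ((i : Int) = d) := by omega
      have hstep : d < ((i+1 : Nat) : Int) := by push_cast; omega
      by_cases hm : (i : Int) ∈ ds
      · simp [keepIdx, hm, hne, ih _ hstep]
      · simp [keepIdx, hm, hne, ih _ hstep]

theorem keepIdx_eraseIdx {α : Type} (xs : List α) (i d : Nat) (ds : List Int)
    (hgt : ∀ e ∈ ds, (d : Int) < e) (hle : i ≤ d) (hlt : d - i < xs.length) :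
    (keepIdx ds i xs).eraseIdx (d - i) = keepIdx ((d : Int) :: ds) i xs := by
  induction xs generalizing i with
  | nil => simp at hlt
  | cons x xs ih =>
      have hnot : (i : Int) ∉ ds := fun hm => by have := hgt _ hm; omega
      have hL : keepIdx ds i (x :: xs) = x :: keepIdx ds (i+1) xs := by
        simp [keepIdx, hnot]
      by_cases heq : i = d
      · subst heq
        have hR : keepIdx ((i : Int) :: ds) i (x :: xs) = keepIdx ((i : Int) :: ds) (i+1) xs := by
          simp [keepIdx]
        rw [hL, hR, show i - i = 0 from by omega, List.eraseIdx_cons_zero,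
          keepIdx_irrel _ _ _ _ (by push_cast; omega)]
      · have hiin : ((i : Int)) ∉ ((d : Int) :: ds) := by
          simp only [List.mem_cons]
          rintro (h1 | h1)
          · omega
          · exact hnot h1
        have hR : keepIdx ((d : Int) :: ds) i (x :: xs)
            = x :: keepIdx ((d : Int) :: ds) (i+1) xs := by
          simp [keepIdx, hiin]
        rw [hL, hR, show d - i = (d - (i+1)) + 1 from by omega, List.eraseIdx_cons_succ]
        exact congrArg (x :: ·)
          (ih (i+1) (by omega) (by simp only [List.length_cons] at hlt; omega))

theorem foldr_erase_eq_keepIdx {α : Type} (ds : List Int) (xs : List α)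
    (hsorted : ds.Pairwise (· < ·))
    (hvalid : ∀ d ∈ ds, 0 ≤ d ∧ d.toNat < xs.length) :
    ds.foldr (fun d acc => acc.eraseIdx d.toNat) xs = keepIdx ds 0 xs := by
  induction ds with
  | nil => simpa using (keepIdx_nil 0 xs).symm
  | cons d ds ih =>
      have hd := hvalid d (by simp)
      have hcast : ((d.toNat : Nat) : Int) = d := by omega
      have hstep := keepIdx_eraseIdx xs 0 d.toNat ds
        (fun e he => by have := (List.pairwise_cons.mp hsorted).1 e he; omega)
        (Nat.zero_le _) (by omega)
      rw [hcast] at hstep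
      simp only [List.foldr_cons]
      rw [ih (List.pairwise_cons.mp hsorted).2
        (fun e he => hvalid e (List.mem_cons_of_mem _ he))]
      simpa using hstep

theorem keepIdx_eq_filter {α : Type} (ds : List Int) (p : α → Bool) :
    ∀ (xs : List α) (i : Nat),
      (∀ k : Nat, (hk : k < xs.length) → (((i + k : Nat) : Int) ∈ ds ↔ p xs[k] = true)) →
      keepIdx ds i xs = xs.filter (fun x => !p x) := by
  intro xs
  induction xs with
  | nil => intro i _; rfl
  | cons x xs ih =>
      intro i h
      have h0 : ((i : Int) ∈ ds) ↔ p x = true := by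
        simpa using h 0 (by simp)
      have hrec := ih (i+1) (fun k hk => by
        have := h (k+1) (by simpa using Nat.succ_lt_succ hk)
        simpa [Nat.add_assoc, Nat.add_comm 1 k, Nat.add_left_comm] using this)
      cases hp : p x with
      | true => simp [keepIdx, h0.mpr hp, hrec, hp]
      | false =>
          have : (i : Int) ∉ ds := fun hm => by simp [h0.mp hm] at hp
          simp [keepIdx, this, hrec, hp]

-- the access-the-list-backwards loop of A reads exactly ds.reverse
theorem map_backIdx (ds : List Int) :
    (PySem.List.pyRange 0 (ds.length : Int) 1).map
        (fun i => PySem.List.pyGet? ds ((ds.length : Int) - 1 - i))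
      = ds.reverse.map some := by
  apply List.ext_getElem
  · simp [PySem.List.length_pyRange_one]
  · intro j h1 h2
    have hj : j < ds.length := by
      simpa [PySem.List.length_pyRange_one] using h1
    simp only [List.getElem_map, List.getElem_reverse]
    rw [PySem.List.getElem_pyRange_one]
    have hc : (0 : Int) + (j : Int) = (j : Int) := by omega
    rw [hc]
    have hc2 : (ds.length : Int) - 1 - (j : Int) = ((ds.length - 1 - j : Nat) : Int) := by
      omega
    rw [hc2, PySem.List.pyGet?_natCast, List.getElem?_eq_getElem (by omega)]

-- membership characterisation of A's mark list
theorem mem_marks (result_list total_list : List (List Int)) (x : Int) :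
    x ∈ result_list.foldl (fun acc clauses_list =>
          (PySem.List.enumerate total_list).foldl (fun acc2 p =>
            if pvCheck clauses_list p.2 then acc2 ++ [p.1] else acc2) acc) []
      ↔ ∃ k : Nat, ∃ hk : k < total_list.length,
          x = (k : Int) ∧ pvSat result_list (total_list[k]'hk) = true := by
  have hshape :
      result_list.foldl (fun acc clauses_list =>
        (PySem.List.enumerate total_list).foldl (fun acc2 p =>
          if pvCheck clauses_list p.2 then acc2 ++ [p.1] else acc2) acc) []
      = [] ++ result_list.flatMap (fun clauses_list =>
          ((PySem.List.enumerate total_list).filter (fun p => pvCheck clauses_list p.2)).map (·.1)) := by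
    rw [← PySem.List.foldl_append_eq_flatMap]
    apply PySem.List.foldl_congr_mem
    intro acc cl _
    exact PySem.List.foldl_append_if _ _ _ _
  rw [hshape, List.nil_append]
  simp only [List.mem_flatMap, List.mem_map, List.mem_filter,
    PySem.List.mem_enumerate_iff, pvSat, List.any_eq_true]
  constructor
  · rintro ⟨cl, hcl, p, ⟨⟨k, hk, rfl⟩, hchk⟩, rfl⟩
    exact ⟨k, hk, by simp, cl, hcl, by simpa [pvCheck_eq_all] using hchk⟩
  · rintro ⟨k, hk, rfl, cl, hcl, hall⟩
    exact ⟨cl, hcl, ((0 : Int) + k, total_list[k]), ⟨⟨k, hk, rfl⟩,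
      by simpa [pvCheck_eq_all] using hall⟩, by simp⟩

-- ===== VERDICT (by name: the statement is the Claim_ definition above) =====
theorem get_new_total_list1_spec : Claim_equal_get_new_total_list1 := by
  intro result_list total_list _
  unfold Spec_get_new_total_list1 get_new_total_list1 get_new_total_list1_alt
  simp only
  set hd := result_list.foldl (fun acc clauses_list =>
    (PySem.List.enumerate total_list).foldl (fun acc2 p =>
      if pvCheck clauses_list p.2 then acc2 ++ [p.1] else acc2) acc) [] with hhd
  set ds := PySem.List.sorted (PySem.Set.ofList hd) (fun x => x) false with hds
  -- membership in ds
  have hmem : ∀ x : Int, x ∈ ds ↔ ∃ k : Nat, ∃ hk : k < total_list.length,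
      x = (k : Int) ∧ pvSat result_list (total_list[k]'hk) = true := by
    intro x
    rw [hds, PySem.List.mem_sorted, PySem.Set.mem_ofList, hhd]
    exact mem_marks result_list total_list x
  -- ds is strictly sorted and its entries are valid indices
  have hnodup : ds.Nodup := ((PySem.List.sorted_perm _ _ _).nodup_iff).mpr
    (PySem.Set.nodup_ofList hd)
  have hpair : ds.Pairwise (· < ·) := by
    have h1 : ds.Pairwise (fun a b => a ≤ b) := by
      simpa using PySem.List.sorted_pairwise (xs := PySem.Set.ofList hd) (key := fun x => x)
    exact ((h1.and hnodup).imp (fun h => lt_of_le_of_ne h.1 h.2))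
  have hvalid : ∀ d ∈ ds, 0 ≤ d ∧ d.toNat < total_list.length := by
    intro d hdm
    obtain ⟨k, hk, rfl, _⟩ := (hmem d).mp hdm
    exact ⟨by positivity, by simpa using hk⟩
  -- turn A's backwards-indexing loop into foldr eraseIdx
  have h1 : ((PySem.List.pyRange 0 (ds.length : Int) 1).map
      (fun i => PySem.List.pyGet? ds ((ds.length : Int) - 1 - i))).foldl
      pvDelStep total_list
      = ds.foldr (fun d acc => acc.eraseIdx d.toNat) total_list := by
    rw [map_backIdx, List.foldl_map, List.foldl_reverse]
    rfl
  rw [List.foldl_map] at h1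
  rw [h1, foldr_erase_eq_keepIdx ds total_list hpair hvalid]
  apply keepIdx_eq_filter ds (pvSat result_list) total_list 0
  intro k hk
  rw [hmem]
  constructor
  · rintro ⟨k', hk', hkeq, hsat⟩
    have : k = k' := by omega
    subst this; exact hsat
  · intro hsat; exact ⟨k, hk, by simp, hsat⟩
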